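-- pv_equiv track=rewrite | github.com/IvanHRz/Chronos-DFIR | engine/sigma_engine.py | _find_time_column
-- ===== SOURCE A (Python) =====
-- from typing import Optional
--
-- def _find_time_column(columns: list[str]) -> Optional[str]:
--     """Find the best time column in the DataFrame for temporal correlation."""
--     time_candidates = ["Time", "Timestamp", "EventTime", "TimeCreated",
--                        "UtcTime", "CreationUtcTime", "_time", "date", "Date"]
--     for cand in time_candidates:
--         for col in columns:
--             if col.lower() == cand.lower():
--                 return col
--     return None
-- ===== SOURCE B (Python) =====
-- from typing import Optional
--
-- def _find_time_column(columns: list[str]) -> Optional[str]: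
--     """Find the best time column in the DataFrame for temporal correlation."""
--     time_candidates = ["Time", "Timestamp", "EventTime", "TimeCreated",
--                        "UtcTime", "CreationUtcTime", "_time", "date", "Date"]
--     priority = {}
--     for i, cand in enumerate(time_candidates):
--         priority.setdefault(cand.lower(), i)
--     best_p = None
--     best_col = None
--     for col in columns:
--         p = priority.get(col.lower())
--         if p is not None and (best_p is None or p < best_p):
--             best_p = p
--             best_col = col
--     return best_col
-- ===== Notes on version B (the rewrite author's own statement) =====
-- stated objective: faster
-- what changed: Replaced A's candidate-outer/column-inner nested scan (up to 9 passes over the columns) by a lowercased-name-to-priority dict built once plus a single pass over the columns keeping the column with the strictly smallest priority.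
import Mathlib
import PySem

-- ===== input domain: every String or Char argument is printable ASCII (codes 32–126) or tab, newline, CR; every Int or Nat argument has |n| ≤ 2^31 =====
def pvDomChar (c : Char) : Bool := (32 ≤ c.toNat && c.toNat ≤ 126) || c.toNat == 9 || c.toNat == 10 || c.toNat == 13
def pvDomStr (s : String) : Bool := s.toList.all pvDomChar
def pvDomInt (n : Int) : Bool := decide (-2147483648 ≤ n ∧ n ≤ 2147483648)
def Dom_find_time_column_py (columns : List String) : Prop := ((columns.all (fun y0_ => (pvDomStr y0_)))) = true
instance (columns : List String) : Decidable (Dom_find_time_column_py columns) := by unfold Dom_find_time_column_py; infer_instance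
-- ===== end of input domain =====

-- B replaces A's candidate-outer/column-inner nested scan by a lowercased-name→priority
-- table plus a single pass over the columns keeping the best (strictly smaller) priority.

-- ===== PORT A =====
def timeCandidates : List String :=
  ["Time", "Timestamp", "EventTime", "TimeCreated",
   "UtcTime", "CreationUtcTime", "_time", "date", "Date"]

def innerA (cand : String) : List String → Option String
  | [] => none
  | col :: rest =>
    if PySem.Str.lower col == PySem.Str.lower cand then some col else innerA cand rest

def outerA (columns : List String) : List String → Option String
  | [] => none
  | cand :: rest =>
    match innerA cand columns with
    | some c => some c
    | none => outerA columns rest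

def find_time_column_py (columns : List String) : Option String :=
  outerA columns timeCandidates

-- ===== PORT B =====
def prioDict : PySem.Dict String Int :=
  (PySem.List.enumerate timeCandidates).foldl
    (fun d p =>
      match d.get? (PySem.Str.lower p.2) with
      | some _ => d
      | none => d.insert (PySem.Str.lower p.2) p.1)
    PySem.Dict.empty

def loopB (d : PySem.Dict String Int) : List String → Option Int → Option String → Option String
  | [], _, bc => bc
  | col :: rest, bp, bc =>
    match d.get? (PySem.Str.lower col) with
    | none => loopB d rest bp bc
    | some p =>
      match bp with
      | none => loopB d rest (some p) (some col)
      | some b => if p < b then loopB d rest (some p) (some col) else loopB d rest bp bc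

def find_time_column_py_alt (columns : List String) : Option String :=
  loopB prioDict columns none none

-- ===== PRECONDITION & SPEC =====
def Spec_find_time_column_py (columns : List String) (out : Option String) : Prop := out = find_time_column_py_alt columns
instance (columns : List String) (out : Option String) : Decidable (Spec_find_time_column_py columns out) := by unfold Spec_find_time_column_py; infer_instance

-- ===== CLAIM (what is proved, stated in full; the proofs are below) =====
def Claim_equal_find_time_column_py : Prop := ∀ (columns : List String), Dom_find_time_column_py columns → Spec_find_time_column_py columns (find_time_column_py columns)

-- ===== LEMMAS AND PROOFS =====

-- proof-side abbreviations ---------------------------------------------------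
def low (c : String) : String := PySem.Str.lower c

def lowkeys : List String :=
  ["time", "timestamp", "eventtime", "timecreated",
   "utctime", "creationutctime", "_time", "date", "date"]

-- generic "A with a list of already-lowercased keys"
def gA (cols : List String) : List String → Option String
  | [] => none
  | k :: ks =>
    match cols.find? (fun c => low c == k) with
    | some x => some x
    | none => gA cols ks

-- priority of a column w.r.t. a key list: index of first key equal to its lowercase
def Pk (ks : List String) (c : String) : Option Nat :=
  ks.findIdx? (fun k => k == low c)

-- common specification: first column attaining the minimal priority
def outS (ks : List String) (cols : List String) : Option String :=
  match (cols.filterMap (Pk ks)).min? with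
  | none => none
  | some m =>
    match cols.find? (fun c => Pk ks c == some m) with
    | some x => some x
    | none => none

-- generic B loop, parameterized by the priority function
def loopG (P : String → Option Int) : List String → Option Int → Option String → Option String
  | [], _, bc => bc
  | col :: rest, bp, bc =>
    match P col with
    | none => loopG P rest bp bc
    | some p =>
      match bp with
      | none => loopG P rest (some p) (some col)
      | some b => if p < b then loopG P rest (some p) (some col) else loopG P rest bp bc

def PInt (c : String) : Option Int := (Pk lowkeys c).map (fun n => (n : Int))

def pltb (m : Int) : Option Int → Bool
  | none => true
  | some b => m < b

-- small generic helpers ------------------------------------------------------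
theorem beq_comm_str (a b : String) : (a == b) = (b == a) := by
  by_cases h : a = b
  · simp [h]
  · simp [h, Ne.symm h]

theorem find?_congr_mem {α : Type} (l : List α) (p q : α → Bool)
    (h : ∀ x ∈ l, p x = q x) : l.find? p = l.find? q := by
  induction l with
  | nil => rfl
  | cons a t ih =>
    have ha := h a (by simp)
    simp only [List.find?]
    rw [ha]
    cases q a <;> simp [ih (fun x hx => h x (by simp [hx]))]

theorem filterMap_map_opt {α β γ : Type} (f : α → Option β) (g : β → γ) (l : List α) :
    l.filterMap (fun x => (f x).map g) = (l.filterMap f).map g := by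
  induction l with
  | nil => rfl
  | cons a t ih => cases h : f a <;> simp [List.filterMap_cons, h, ih]

theorem min?_cons_eq {α : Type} [LinearOrder α] (a : α) (l : List α) :
    (a :: l).min? = some (match l.min? with | none => a | some m => min a m) := by
  rw [List.min?_cons]
  cases l.min? <;> rfl

theorem min?_map_mono {α β : Type} [LinearOrder α] [LinearOrder β] (g : α → β)
    (hg : ∀ a b : α, g (min a b) = min (g a) (g b)) (l : List α) :
    (l.map g).min? = l.min?.map g := by
  induction l with
  | nil => rfl
  | cons a t ih =>
    rw [List.map_cons, min?_cons_eq, min?_cons_eq]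
    cases h : t.min? with
    | none =>
      have : (t.map g).min? = none := by rw [ih, h]; rfl
      simp [h, this]
    | some m =>
      have : (t.map g).min? = some (g m) := by rw [ih, h]; rfl
      simp [h, this, hg]

-- A-side ----------------------------------------------------------------------
theorem innerA_eq (cand : String) (cols : List String) :
    innerA cand cols = cols.find? (fun c => low c == PySem.Str.lower cand) := by
  induction cols with
  | nil => rfl
  | cons a t ih =>
    simp only [innerA, List.find?, low]
    cases h : (PySem.Str.lower a == PySem.Str.lower cand) <;> simp [low, h, ih]

theorem outerA_eq_gA (l : List String) (cols : List String) :
    outerA cols l = gA cols (l.map low) := by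
  induction l with
  | nil => rfl
  | cons cand t ih =>
    simp only [outerA, List.map_cons, gA, innerA_eq, low, ih]

theorem Pk_nil (c : String) : Pk [] c = none := rfl

-- Pk on a cons of keys
theorem Pk_cons (k : String) (ks : List String) (c : String) :
    Pk (k :: ks) c = if k == low c then some 0 else (Pk ks c).map (· + 1) := by
  simp [Pk, List.findIdx?_cons]

theorem gA_eq_outS (ks : List String) (cols : List String) :
    gA cols ks = outS ks cols := by
  induction ks with
  | nil =>
    have h0 : cols.filterMap (Pk []) = [] := by
      induction cols with
      | nil => rfl
      | cons a t iht => simpa [List.filterMap_cons, Pk_nil] using iht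
    simp [gA, outS, h0]
  | cons k ks ih =>
    cases hf : cols.find? (fun c => low c == k) with
    | some x =>
      -- head key matched: priority 0 is attained, answer is the find? result
      have hx : x ∈ cols := List.mem_of_find?_eq_some hf
      have hpx : (low x == k) = true := by
        have := List.find?_some hf
        simpa using this
      have hPx : Pk (k :: ks) x = some 0 := by
        rw [Pk_cons, beq_comm_str k (low x), hpx]; rfl
      have h0 : (0 : Nat) ∈ cols.filterMap (Pk (k :: ks)) :=
        List.mem_filterMap.mpr ⟨x, hx, hPx⟩
      have hmin : (cols.filterMap (Pk (k :: ks))).min? = some 0 :=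
        List.min?_eq_some_iff.mpr ⟨h0, fun b _ => Nat.zero_le b⟩
      have hpred : ∀ c, ((Pk (k :: ks) c == some 0) : Bool) = (low c == k) := by
        intro c
        rw [Pk_cons, beq_comm_str k (low c)]
        cases h : (low c == k) with
        | true => simp [h]
        | false => cases Pk ks c <;> simp
      have hfind : cols.find? (fun c => Pk (k :: ks) c == some 0) = some x := by
        rw [find?_congr_mem cols _ _ (fun c _ => hpred c)]; exact hf
      simp [gA, hf, outS, hmin, hfind]
    | none =>
      -- head key never matches: every priority shifts by one
      have hnone : ∀ c ∈ cols, (low c == k) = false := by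
        intro c hc
        have := List.find?_eq_none.mp hf c hc
        simpa using this
      have hshift : ∀ c ∈ cols, Pk (k :: ks) c = (Pk ks c).map (· + 1) := by
        intro c hc
        rw [Pk_cons, beq_comm_str k (low c), hnone c hc]
        simp
      have hfm : cols.filterMap (Pk (k :: ks)) = (cols.filterMap (Pk ks)).map (· + 1) := by
        rw [← filterMap_map_opt]
        exact List.filterMap_congr hshift
      have hstep : gA cols (k :: ks) = gA cols ks := by
        show (match cols.find? (fun c => low c == k) with
              | some x => some x
              | none => gA cols ks) = gA cols ks
        rw [hf]
      rw [hstep, ih]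
      unfold outS
      rw [hfm]
      cases hb : (cols.filterMap (Pk ks)).min? with
      | none =>
        have hz : ((cols.filterMap (Pk ks)).map (· + 1)).min? = none := by
          rw [min?_map_mono (· + 1) (fun a b => by
            show min a b + 1 = min (a + 1) (b + 1); omega), hb]; rfl
        rw [hz]
      | some m =>
        have hmin : ((cols.filterMap (Pk ks)).map (· + 1)).min? = some (m + 1) := by
          rw [min?_map_mono (· + 1) (fun a b => by show min a b + 1 = min (a + 1) (b + 1); omega), hb]; rfl
        rw [hmin]
        have hpred2 : ∀ c ∈ cols,
            ((Pk (k :: ks) c == some (m + 1)) : Bool) = (Pk ks c == some m) := by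
          intro c hc
          rw [hshift c hc]
          cases Pk ks c with
          | none => simp
          | some v => simp
        show (match cols.find? (fun c => Pk ks c == some m) with
              | some x => some x
              | none => none) =
            (match cols.find? (fun c => Pk (k :: ks) c == some (m + 1)) with
              | some x => some x
              | none => none)
        rw [find?_congr_mem cols _ _ hpred2]

-- B-side ----------------------------------------------------------------------
theorem prioDict_get (s : String) :
    prioDict.get? s = (List.findIdx? (fun k => k == s) lowkeys).map (fun n => (n : Int)) := by
  have h : prioDict = PySem.Dict.mk
      [("time", 0), ("timestamp", 1), ("eventtime", 2), ("timecreated", 3),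
       ("utctime", 4), ("creationutctime", 5), ("_time", 6), ("date", 7)] := by decide
  rw [h]
  simp only [lowkeys, List.findIdx?_cons, PySem.Dict.get?_mk_cons]
  by_cases h1 : ("time" : String) == s <;>
  by_cases h2 : ("timestamp" : String) == s <;>
  by_cases h3 : ("eventtime" : String) == s <;>
  by_cases h4 : ("timecreated" : String) == s <;>
  by_cases h5 : ("utctime" : String) == s <;>
  by_cases h6 : ("creationutctime" : String) == s <;>
  by_cases h7 : ("_time" : String) == s <;>
  by_cases h8 : ("date" : String) == s <;>
  simp [h1, h2, h3, h4, h5, h6, h7, h8, PySem.Dict.get?,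
    (rfl : List.findIdx? (fun k => k == s) ([] : List String) = none)]

theorem prioDict_get_low (c : String) : prioDict.get? (low c) = PInt c := by
  rw [prioDict_get, PInt, Pk]

theorem loopB_eq_loopG (cols : List String) (bp : Option Int) (bc : Option String) :
    loopB prioDict cols bp bc = loopG PInt cols bp bc := by
  induction cols generalizing bp bc with
  | nil => rfl
  | cons c t ih =>
    simp only [loopB, loopG, ← prioDict_get_low c, low]
    cases prioDict.get? (PySem.Str.lower c) with
    | none => exact ih bp bc
    | some p =>
      cases bp with
      | none => exact ih (some p) (some c)
      | some b => by_cases hpb : p < b <;> simp [hpb, ih]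

-- characterization of the generic single-pass loop
theorem loopG_char (P : String → Option Int) (cols : List String)
    (bp : Option Int) (bc : Option String) :
    loopG P cols bp bc =
      match (cols.filterMap P).min? with
      | none => bc
      | some m =>
        if pltb m bp then
          (match cols.find? (fun c => P c == some m) with
           | some x => some x
           | none => bc)
        else bc := by
  induction cols generalizing bp bc with
  | nil => rfl
  | cons c t ih =>
    cases hPc : P c with
    | none =>
      have hfm : (c :: t).filterMap P = t.filterMap P := by simp [List.filterMap_cons, hPc]
      have hfd : ∀ m, (c :: t).find? (fun x => P x == some m) = t.find? (fun x => P x == some m) := by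
        intro m; simp [List.find?, hPc]
      simp only [loopG, hPc, ih, hfm]
      cases (t.filterMap P).min? with
      | none => rfl
      | some m => simp only [hfd]
    | some p =>
      have hfm : (c :: t).filterMap P = p :: t.filterMap P := by
        simp [List.filterMap_cons, hPc]
      have hupd : loopG P (c :: t) bp bc = (if pltb p bp then loopG P t (some p) (some c)
          else loopG P t bp bc) := by
        cases bp with
        | none => simp [loopG, hPc, pltb]
        | some b => by_cases hpb : p < b <;> simp [loopG, hPc, pltb, hpb]
      rw [hupd, hfm, min?_cons_eq]
      cases hb : (t.filterMap P).min? with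
      | none =>
        -- no priorities in the tail
        have hft : t.find? (fun x => P x == some p) = none := by
          apply List.find?_eq_none.mpr
          intro x hx
          cases hPx : P x with
          | none => simp
          | some q =>
            exfalso
            have : q ∈ t.filterMap P := List.mem_filterMap.mpr ⟨x, hx, hPx⟩
            rw [List.min?_eq_none_iff.mp hb] at this; simp at this
        by_cases hp : pltb p bp = true
        · simp only [hp, if_true, ih, hb]
          simp [pltb, List.find?, hPc, hft]
        · simp only [Bool.not_eq_true] at hp
          simp [hp, ih, hb, List.find?, hPc, hft]
      | some m =>
        have hmemt : ∃ x, t.find? (fun c => P c == some m) = some x := by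
          have hm : m ∈ t.filterMap P := List.min?_mem hb
          rw [List.mem_filterMap] at hm
          obtain ⟨x, hx, hPx⟩ := hm
          exact Option.isSome_iff_exists.mp (by rw [List.find?_isSome]; exact ⟨x, hx, by simp [hPx]⟩)
        obtain ⟨x, hfx⟩ := hmemt
        by_cases hmp : m < p
        · -- tail minimum wins
          have hminpm : min p m = m := by omega
          have hfcons : (c :: t).find? (fun y => P y == some m) = some x := by
            have : ((P c == some m) : Bool) = false := by simp [hPc]; omega
            simp [List.find?, this, hfx]
          by_cases hp : pltb p bp = true
          · have hmbp : pltb m bp = true := by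
              cases bp <;> simp [pltb] at hp ⊢ <;> omega
            have hmp' : pltb m (some p) = true := by simp [pltb]; omega
            simp only [hp, if_true, ih, hb, hminpm, hmbp, hmp', hfcons, hfx, if_true]
          · have hp' : pltb p bp = false := by simpa using hp
            have hmbp : pltb m bp = pltb m bp := rfl
            simp only [hp', Bool.false_eq_true, if_false, ih, hb, hminpm, hfcons, hfx]
        · -- head priority wins (ties go to the head, which comes first)
          have hminpm : min p m = p := by omega
          have hfcons : (c :: t).find? (fun y => P y == some p) = some c := by
            simp [List.find?, hPc]
          by_cases hp : pltb p bp = true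
          · have : pltb m (some p) = false := by simp [pltb]; omega
            simp only [hp, if_true, ih, hb, this, Bool.false_eq_true, if_false, hminpm,
              hfcons, hp]
          · have hp' : pltb p bp = false := by simpa using hp
            have hmbp : pltb m bp = false := by
              cases bp <;> simp [pltb] at hp' ⊢ <;> omega
            simp only [hp', Bool.false_eq_true, if_false, ih, hb, hminpm, hfcons, hmbp, hp']

-- glue ------------------------------------------------------------------------
theorem lowkeys_eq : timeCandidates.map low = lowkeys := by decide

theorem filterMap_PInt (cols : List String) :
    cols.filterMap PInt = (cols.filterMap (Pk lowkeys)).map (Nat.cast : Nat → Int) := by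
  rw [← filterMap_map_opt]
  apply List.filterMap_congr
  intro x _
  unfold PInt
  cases h : Pk lowkeys x <;> simp [h]

theorem alt_eq_outS (cols : List String) :
    find_time_column_py_alt cols = outS lowkeys cols := by
  rw [find_time_column_py_alt, loopB_eq_loopG, loopG_char, outS, filterMap_PInt,
    min?_map_mono (Nat.cast : Nat → Int) (fun a b => by
      show ((min a b : Nat) : Int) = min (a : Int) (b : Int); omega)]
  cases hb : (cols.filterMap (Pk lowkeys)).min? with
  | none => rfl
  | some m =>
    have hpred : ∀ c ∈ cols,
        ((PInt c == some ((m : Int))) : Bool) = (Pk lowkeys c == some m) := by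
      intro c _
      unfold PInt
      cases h : Pk lowkeys c with
      | none => simp [h]
      | some v => simp [h]
    show (if pltb ((m : Int)) none then
            (match cols.find? (fun c => PInt c == some ((m : Int))) with
             | some x => some x
             | none => none)
          else none) =
        (match cols.find? (fun c => Pk lowkeys c == some m) with
         | some x => some x
         | none => none)
    rw [find?_congr_mem cols _ _ hpred]
    simp [pltb]

-- ===== VERDICT (by name: the statement is the Claim_ definition above) =====
theorem find_time_column_py_spec : Claim_equal_find_time_column_py := by
  intro columns _
  unfold Spec_find_time_column_py
  rw [find_time_column_py, outerA_eq_gA, lowkeys_eq, gA_eq_outS, alt_eq_outS]
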